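-- pv_equiv track=rewrite | github.com/tayyabahamna-design/EDUSENSEI | app.py | generate_exercises
-- ===== SOURCE A (Python) =====
-- def generate_exercises(topics):
--     """Generate categorized exercises for given topics"""
--     exercises = {}
--     categories = ['Reading', 'Writing', 'Oral Communication', 'Comprehension', 'Grammar', 'Vocabulary']
--
--     for i, topic in enumerate(topics):
--         # Distribute topics across categories
--         category = categories[i % len(categories)]
--         if category not in exercises:
--             exercises[category] = []
--         exercises[category].append({
--             'title': topic,
--             'type': category,
--             'difficulty': 'basic' if len(topic) < 15 else 'intermediate'
--         })
--
--     return exercises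
-- ===== SOURCE B (Python) =====
-- def generate_exercises(topics):
--     """Generate categorized exercises for given topics"""
--     categories = ['Reading', 'Writing', 'Oral Communication', 'Comprehension', 'Grammar', 'Vocabulary']
--     result = {}
--     for c, category in enumerate(categories):
--         group = [topics[i] for i in range(c, len(topics), len(categories))]
--         if group:
--             result[category] = [{
--                 'title': t,
--                 'type': category,
--                 'difficulty': 'basic' if len(t) < 15 else 'intermediate'
--             } for t in group]
--     return result
-- ===== Notes on version B (the rewrite author's own statement) =====
-- stated objective: alternative
-- what changed: Replaces the single modulo-indexed pass that grows dict entries one exercise at a time with an outer loop over the six categories that builds each category's full exercise list at once from the strided index range range(c, len(topics), 6), adding the key only when that stride is non-empty.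
import Mathlib
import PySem

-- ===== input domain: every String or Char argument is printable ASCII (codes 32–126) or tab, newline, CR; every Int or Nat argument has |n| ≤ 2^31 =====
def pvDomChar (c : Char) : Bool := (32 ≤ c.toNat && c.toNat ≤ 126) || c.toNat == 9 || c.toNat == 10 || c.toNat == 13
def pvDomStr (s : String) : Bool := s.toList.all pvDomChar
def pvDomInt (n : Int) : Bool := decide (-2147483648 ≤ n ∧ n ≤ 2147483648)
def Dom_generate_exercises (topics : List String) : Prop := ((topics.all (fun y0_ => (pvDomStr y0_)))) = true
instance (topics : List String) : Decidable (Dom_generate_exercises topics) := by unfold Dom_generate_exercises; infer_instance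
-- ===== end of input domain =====

-- B replaces A's single modulo-indexed pass (growing dict entries one exercise at a time) with an
-- outer loop over the six categories that builds each category's whole list at once from the strided
-- index range range(c, len(topics), 6); same result, a genuinely different decomposition (alternative).

-- ===== PORT A =====
def pvCategories : List String :=
  ["Reading", "Writing", "Oral Communication", "Comprehension", "Grammar", "Vocabulary"]

def pvExercise (topic category : String) : List (String × String) :=
  [("title", topic), ("type", category),
   ("difficulty", if PySem.Str.len topic < 15 then "basic" else "intermediate")]

def generate_exercises (topics : List String) : List (String × List (List (String × String))) :=
  (List.foldl
    (fun exercises p =>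
      let category := PySem.List.pyGetD pvCategories (PySem.Int.mod p.1 (PySem.List.len pvCategories)) ""
      let exercises := if exercises.contains category then exercises else exercises.insert category []
      -- exercises[category].append(…): the key is present here, so this is exactly Dict.modify
      exercises.modify category [] (fun l => l ++ [pvExercise p.2 category]))
    PySem.Dict.empty (PySem.List.enumerate topics)).items

-- ===== PORT B =====
def generate_exercises_alt (topics : List String) : List (String × List (List (String × String))) :=
  (List.foldl
    (fun result p =>
      let group := (PySem.List.pyRange p.1 (PySem.List.len topics) (PySem.List.len pvCategories)).map
        (fun i => PySem.List.pyGetD topics i "")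
      if group = [] then result
      else result.insert p.2 (group.map (fun t => pvExercise t p.2)))
    PySem.Dict.empty (PySem.List.enumerate pvCategories)).items

-- ===== PRECONDITION & SPEC =====
def Spec_generate_exercises (topics : List String) (out : List (String × List (List (String × String)))) : Prop := out = generate_exercises_alt topics
instance (topics : List String) (out : List (String × List (List (String × String)))) : Decidable (Spec_generate_exercises topics out) := by unfold Spec_generate_exercises; infer_instance

-- ===== CLAIM (what is proved, stated in full; the proofs are below) =====
def Claim_equal_generate_exercises : Prop := ∀ (topics : List String), Dom_generate_exercises topics → Spec_generate_exercises topics (generate_exercises topics)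

-- ===== LEMMAS AND PROOFS =====
def pvCat (c : Nat) : String := pvCategories.getD c ""

def pvGcat (i : Nat) : String := pvCat (i % 6)

def pvCanon (topics : List String) : List (String × List (List (String × String))) :=
  (List.range (min topics.length 6)).map (fun c =>
    (pvCat c,
     (List.range ((topics.length - c + 5) / 6)).map
       (fun k => pvExercise (topics.getD (c + 6 * k) "") (pvCat c))))

theorem pvCat_inj : ∀ a b : Nat, a < 6 → b < 6 → (pvCat a = pvCat b ↔ a = b) := by
  have h : ∀ a ∈ List.range 6, ∀ b ∈ List.range 6, (pvCat a = pvCat b ↔ a = b) := by decide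
  intro a b ha hb
  exact h a (List.mem_range.mpr ha) b (List.mem_range.mpr hb)

theorem strided (c : Nat) (hc : c < 6) : ∀ n : Nat,
    (List.range n).filter (fun i => pvGcat i == pvCat c)
      = (List.range ((n - c + 5) / 6)).map (fun k => c + 6 * k) := by
  intro n
  induction n with
  | zero => simp
  | succ n ih =>
    rw [List.range_succ, List.filter_append, ih]
    by_cases h : n % 6 = c
    · have hle : c ≤ n := h ▸ Nat.mod_le n 6
      have hm : (n + 1 - c + 5) / 6 = (n - c + 5) / 6 + 1 := by omega
      have hcn : c + 6 * ((n - c + 5) / 6) = n := by omega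
      rw [hm, List.range_succ, List.map_append]
      simp [pvGcat, h, hcn]
    · have hm : (n + 1 - c + 5) / 6 = (n - c + 5) / 6 := by omega
      rw [hm]
      have : (pvGcat n == pvCat c) = false := by
        simp only [beq_eq_false_iff_ne, ne_eq, pvGcat]
        rw [pvCat_inj _ _ (Nat.mod_lt _ (by omega)) hc]
        exact h
      simp [this]

theorem keys_take : ∀ n : Nat,
    PySem.Set.ofList ((List.range n).map pvGcat) = (List.range (min n 6)).map pvCat := by
  intro n
  induction n with
  | zero => simp [PySem.Set.ofList]
  | succ n ih =>
    rw [List.range_succ, List.map_append, List.map_singleton, PySem.Set.ofList_append_singleton, ih]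
    by_cases h : 6 ≤ n
    · have h1 : min n 6 = 6 := by omega
      have h2 : min (n + 1) 6 = 6 := by omega
      rw [h1, h2, PySem.Set.add_of_mem]
      exact List.mem_map.mpr ⟨n % 6, List.mem_range.mpr (Nat.mod_lt _ (by omega)), rfl⟩
    · have h1 : min n 6 = n := by omega
      have h2 : min (n + 1) 6 = n + 1 := by omega
      have h3 : pvGcat n = pvCat n := by simp [pvGcat, Nat.mod_eq_of_lt (by omega : n < 6)]
      rw [h1, h2, h3, PySem.Set.add_of_not_mem, List.range_succ, List.map_append, List.map_singleton]
      intro hmem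
      obtain ⟨c, hc, heq⟩ := List.mem_map.mp hmem
      have hc' := List.mem_range.mp hc
      exact absurd ((pvCat_inj c n (by omega) (by omega)).mp heq) (by omega)


theorem step_modify {ν : Type} (d : PySem.Dict String (List ν)) (k : String) (ex : ν) :
    (if d.contains k then d else d.insert k []).modify k [] (fun l => l ++ [ex])
      = d.modify k [] (fun l => l ++ [ex]) := by
  by_cases h : d.contains k
  · simp [h]
  · simp only [h, Bool.false_eq_true, if_false, PySem.Dict.modify,
      PySem.Dict.getD_insert_self, PySem.Dict.insert_insert_self,
      PySem.Dict.getD_of_not_contains d [] (by simpa using h)]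

theorem A_foldl (topics : List String) :
    generate_exercises topics =
      (((List.range topics.length).map
          (fun i => (pvGcat i, pvExercise (topics.getD i "") (pvGcat i)))).foldl
        (fun d p => d.modify p.1 [] (fun l => l ++ [p.2])) PySem.Dict.empty).items := by
  unfold generate_exercises
  rw [PySem.List.enumerate_eq_map_pyRange topics "", PySem.List.len_eq topics, PySem.List.pyRange_zero_nat]
  rw [List.map_map, List.foldl_map, List.foldl_map]
  congr 1
  apply PySem.List.foldl_congr_mem
  intro acc i hi
  simp only [Function.comp_apply]
  have h6 : PySem.List.len pvCategories = ((6 : Nat) : Int) := rfl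
  rw [h6, PySem.Int.mod_natCast, PySem.List.pyGetD_natCast, PySem.List.pyGetD_natCast]
  exact step_modify acc (pvCategories.getD (i % 6) "") _

theorem A_canon (topics : List String) : generate_exercises topics = pvCanon topics := by
  rw [A_foldl]
  have hnd : ((((List.range topics.length).map
        (fun i => (pvGcat i, pvExercise (topics.getD i "") (pvGcat i)))).foldl
        (fun d p => d.modify p.1 [] (fun l => l ++ [p.2])) PySem.Dict.empty)).keys.Nodup :=
    PySem.Dict.nodup_keys_foldl_modify_key _ Prod.fst [] (fun _ p v => v ++ [p.2])
      PySem.Dict.empty PySem.Dict.nodup_keys_empty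
  rw [PySem.Dict.items_eq_map_keys _ hnd []]
  rw [PySem.Dict.keys_foldl_modify_key _ Prod.fst [] (fun _ p v => v ++ [p.2]) PySem.Dict.empty]
  rw [PySem.Dict.keys_empty, PySem.Set.update_nil_left, List.map_map]
  have hfst : ((fun (p : String × List (String × String)) => p.1) ∘
      (fun i => (pvGcat i, pvExercise (topics.getD i "") (pvGcat i)))) = pvGcat := rfl
  rw [hfst, keys_take, List.map_map]
  unfold pvCanon
  apply List.map_congr_left
  intro c hc
  have hc6 : c < 6 := by
    have := List.mem_range.mp hc; omega
  simp only [Function.comp_apply]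
  congr 1
  rw [PySem.Dict.getD_foldl_modify_append _ PySem.Dict.empty (pvCat c)]
  rw [PySem.Dict.getD_empty, List.nil_append, List.filter_map, List.map_map]
  have hpred : ((fun (p : String × List (String × String)) => p.1 == pvCat c) ∘
      (fun i => (pvGcat i, pvExercise (topics.getD i "") (pvGcat i)))) = fun i => pvGcat i == pvCat c := rfl
  rw [hpred, strided c hc6, List.map_map]
  apply List.map_congr_left
  intro k _
  have hmod : (c + 6 * k) % 6 = c := by omega
  simp [Function.comp, pvGcat, hmod]

theorem hgroup (topics : List String) (c : Nat) :
    ((PySem.List.pyRange (c : Int) (PySem.List.len topics) (PySem.List.len pvCategories)).map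
        (fun i => PySem.List.pyGetD topics i ""))
      = (List.range ((topics.length - c + 5) / 6)).map (fun k => topics.getD (c + 6 * k) "") := by
  have h6 : PySem.List.len pvCategories = (6 : Int) := rfl
  rw [h6, PySem.List.len_eq, PySem.List.pyRange_of_pos _ _ (by norm_num), List.map_map]
  have hM : (if (c : Int) < (topics.length : Int) then
      (((topics.length : Int) - (c : Int) + 6 - 1) / 6).toNat else 0) = (topics.length - c + 5) / 6 := by
    split <;> omega
  rw [hM]
  apply List.map_congr_left
  intro k _
  have hcast : ((c : Int) + 6 * (k : Int)) = ((c + 6 * k : Nat) : Int) := by push_cast; ring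
  simp only [Function.comp_apply, hcast, PySem.List.pyGetD_natCast]

theorem pvItems_empty : (PySem.Dict.empty : PySem.Dict String (List (List (String × String)))).items = [] := rfl

theorem B_canon (topics : List String) : generate_exercises_alt topics = pvCanon topics := by
  unfold generate_exercises_alt
  have hcongr : ∀ (d : PySem.Dict String (List (List (String × String)))),
      ∀ p ∈ PySem.List.enumerate pvCategories,
      (let group := (PySem.List.pyRange p.1 (PySem.List.len topics) (PySem.List.len pvCategories)).map
          (fun i => PySem.List.pyGetD topics i "")
       if group = [] then d
       else d.insert p.2 (group.map (fun t => pvExercise t p.2)))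
      = (if topics.length ≤ p.1.toNat then d
         else d.insert p.2 ((List.range ((topics.length - p.1.toNat + 5) / 6)).map
             (fun k => pvExercise (topics.getD (p.1.toNat + 6 * k) "") p.2))) := by
    intro d p hp
    obtain ⟨k, hk, rfl⟩ := (PySem.List.mem_enumerate_iff _ _ _).mp hp
    simp only [Int.zero_add, Int.toNat_natCast]
    rw [hgroup topics k]
    have hempty : ((List.range ((topics.length - k + 5) / 6)).map (fun j => topics.getD (k + 6 * j) "") = [])
        ↔ topics.length ≤ k := by
      have hk6 : k < 6 := by simpa using hk
      simp [List.range_eq_nil]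
      omega
    by_cases h : topics.length ≤ k
    · rw [if_pos (hempty.mpr h), if_pos h]
    · rw [if_neg (fun hx => h (hempty.mp hx)), if_neg h, List.map_map]
      rfl
  rw [PySem.List.foldl_congr_mem _ _ _ _ hcongr]
  simp only [pvCategories, PySem.List.enumerate_cons, PySem.List.enumerate_nil, List.foldl_cons,
    List.foldl_nil]
  generalize hn : topics.length = n
  rcases Nat.lt_or_ge n 6 with h6 | h6
  · interval_cases n <;>
      simp [pvCanon, hn, PySem.Dict.items_insert_of_not_contains, PySem.Dict.contains_insert,
        PySem.Dict.contains_empty, pvItems_empty, pvCat, pvCategories, List.range_succ]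
  · have c0 : ¬ n ≤ 0 := by omega
    have c1 : ¬ n ≤ 1 := by omega
    have c2 : ¬ n ≤ 2 := by omega
    have c3 : ¬ n ≤ 3 := by omega
    have c4 : ¬ n ≤ 4 := by omega
    have c5 : ¬ n ≤ 5 := by omega
    have hmin : min n 6 = 6 := by omega
    simp [c0, c1, c2, c3, c4, c5, pvCanon, hn, hmin, PySem.Dict.items_insert_of_not_contains,
      PySem.Dict.contains_insert, PySem.Dict.contains_empty, pvItems_empty, pvCat,
      pvCategories, List.range_succ]

-- ===== VERDICT (by name: the statement is the Claim_ definition above) =====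
theorem generate_exercises_spec : Claim_equal_generate_exercises := by
  intro topics _
  unfold Spec_generate_exercises
  rw [A_canon, B_canon]
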